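-- pv_equiv track=rewrite | github.com/hardikSrivastav/reforms-dynamic | rforms-engine/app/core/advanced_questioning.py | summarize_conversation
-- ===== SOURCE A (Python) =====
-- from typing import Dict, List, Any, Optional
--
-- def summarize_conversation(session_state: Dict[str, Any]) -> str:
--     """Create a concise summary of the conversation so far.
--
--     Args:
--         session_state: The session state
--
--     Returns:
--         A summary of the conversation
--     """
--     history = session_state.get("question_history", [])
--
--     if not history:
--         return "No conversation history yet."
--
--     summary_parts = []
--
--     # Group by metrics
--     metric_conversations = {}
--
--     for item in history:
--         metric_id = item.get("metric_id", "general")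
--
--         if metric_id not in metric_conversations:
--             metric_conversations[metric_id] = []
--
--         metric_conversations[metric_id].append({
--             "question": item.get("text", ""),
--             "response": item.get("response_text", "")
--         })
--
--     # Create summary for each metric
--     for metric_id, conversations in metric_conversations.items():
--         metric_summary = f"About {metric_id.replace('_', ' ')}:"
--
--         for convo in conversations:
--             summary = f"When asked '{convo['question']}', user responded: '{convo['response'][:100]}...'"
--             metric_summary += f"\n- {summary}"
--
--         summary_parts.append(metric_summary)
--
--     return "\n\n".join(summary_parts)
-- ===== SOURCE B (Python) =====
-- def summarize_conversation(session_state):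
--     """Create a concise summary of the conversation so far (single pass:
--     accumulate each metric's summary string directly, no intermediate
--     list-of-dicts grouping)."""
--     history = session_state.get("question_history", [])
--
--     if not history:
--         return "No conversation history yet."
--
--     summaries = {}
--
--     for item in history:
--         metric_id = item.get("metric_id", "general")
--         if metric_id not in summaries:
--             summaries[metric_id] = f"About {metric_id.replace('_', ' ')}:"
--         summaries[metric_id] += (
--             f"\n- When asked '{item.get('text', '')}', "
--             f"user responded: '{item.get('response_text', '')[:100]}...'"
--         )
--
--     return "\n\n".join(summaries.values())
-- ===== Notes on version B (the rewrite author's own statement) =====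
-- stated objective: simpler
-- what changed: B fuses A's two phases into one pass: instead of first grouping history into a dict of lists of {question,response} dicts and then formatting each group, B keeps one order-preserving dict from metric_id straight to its growing summary string and joins its values.
import Mathlib
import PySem

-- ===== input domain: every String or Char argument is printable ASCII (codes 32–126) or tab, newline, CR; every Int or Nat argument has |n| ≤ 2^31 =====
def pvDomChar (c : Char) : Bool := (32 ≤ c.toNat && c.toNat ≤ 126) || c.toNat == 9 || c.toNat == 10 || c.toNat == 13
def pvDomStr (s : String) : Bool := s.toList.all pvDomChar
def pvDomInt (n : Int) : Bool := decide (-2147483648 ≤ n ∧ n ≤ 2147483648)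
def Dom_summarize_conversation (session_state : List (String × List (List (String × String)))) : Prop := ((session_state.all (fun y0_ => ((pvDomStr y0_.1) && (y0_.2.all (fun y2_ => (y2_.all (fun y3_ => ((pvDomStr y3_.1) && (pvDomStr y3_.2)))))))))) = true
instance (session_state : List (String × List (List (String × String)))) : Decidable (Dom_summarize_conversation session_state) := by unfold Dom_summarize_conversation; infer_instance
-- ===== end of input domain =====

-- One honest line: B fuses A's group-then-format two-phase pass into a single pass that
-- accumulates each metric's summary string directly; same output, simpler decomposition.

-- ===== PORT A =====
-- literal transliteration of A: group history into a dict metric_id ↦ list of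
-- (question, response) pairs, then format each group and join with "\n\n"
def summarize_conversation (session_state : List (String × List (List (String × String)))) : String :=
  let history := (PySem.Dict.mk session_state).getD "question_history" []
  if history = [] then "No conversation history yet."
  else
    let metric_conversations : PySem.Dict String (List (String × String)) :=
      history.foldl (fun d item =>
        let metric_id := (PySem.Dict.mk item).getD "metric_id" "general"
        let d := if d.contains metric_id then d else d.insert metric_id []
        d.insert metric_id (d.getD metric_id [] ++
          [((PySem.Dict.mk item).getD "text" "", (PySem.Dict.mk item).getD "response_text" "")]))
        PySem.Dict.empty
    let summary_parts : List String :=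
      metric_conversations.items.foldl (fun parts kv =>
        let metric_summary := "About " ++ PySem.Str.replace kv.1 "_" " " ++ ":"
        let metric_summary := kv.2.foldl (fun ms convo =>
          ms ++ ("\n- " ++ ("When asked '" ++ convo.1 ++ "', user responded: '" ++
            PySem.Str.slice convo.2 none (some 100) ++ "...'"))) metric_summary
        parts ++ [metric_summary]) []
    PySem.Str.join "\n\n" summary_parts

-- ===== PORT B =====
-- literal transliteration of B: one pass, dict metric_id ↦ growing summary string
def summarize_conversation_alt (session_state : List (String × List (List (String × String)))) : String :=
  let history := (PySem.Dict.mk session_state).getD "question_history" []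
  if history = [] then "No conversation history yet."
  else
    let summaries : PySem.Dict String String :=
      history.foldl (fun d item =>
        let metric_id := (PySem.Dict.mk item).getD "metric_id" "general"
        let d := if d.contains metric_id then d
                 else d.insert metric_id ("About " ++ PySem.Str.replace metric_id "_" " " ++ ":")
        d.insert metric_id (d.getD metric_id "" ++
          ("\n- When asked '" ++ (PySem.Dict.mk item).getD "text" "" ++ "', user responded: '" ++
            PySem.Str.slice ((PySem.Dict.mk item).getD "response_text" "") none (some 100) ++ "...'")))
        PySem.Dict.empty
    PySem.Str.join "\n\n" summaries.values

-- ===== PRECONDITION & SPEC =====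
def Spec_summarize_conversation (session_state : List (String × List (List (String × String)))) (out : String) : Prop := out = summarize_conversation_alt session_state
instance (session_state : List (String × List (List (String × String)))) (out : String) : Decidable (Spec_summarize_conversation session_state out) := by unfold Spec_summarize_conversation; infer_instance

-- ===== CLAIM (what is proved, stated in full; the proofs are below) =====
def Claim_equal_summarize_conversation : Prop := ∀ (session_state : List (String × List (List (String × String)))), Dom_summarize_conversation session_state → Spec_summarize_conversation session_state (summarize_conversation session_state)

-- ===== LEMMAS AND PROOFS =====

-- formatted summary of one metric's grouped conversations (A's second phase)
def pvFmt (k : String) (convos : List (String × String)) : String :=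
  convos.foldl (fun ms convo =>
    ms ++ ("\n- " ++ ("When asked '" ++ convo.1 ++ "', user responded: '" ++
      PySem.Str.slice convo.2 none (some 100) ++ "...'")))
    ("About " ++ PySem.Str.replace k "_" " " ++ ":")

-- B's one-line contribution of one history item
def pvLine (q r : String) : String :=
  "\n- When asked '" ++ q ++ "', user responded: '" ++
    PySem.Str.slice r none (some 100) ++ "...'"

theorem pvLine_eq (q r : String) :
    "\n- " ++ ("When asked '" ++ q ++ "', user responded: '" ++
      PySem.Str.slice r none (some 100) ++ "...'") = pvLine q r := by
  simp [pvLine, ← String.append_assoc]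

theorem pvFmt_append (k : String) (l : List (String × String)) (q r : String) :
    pvFmt k (l ++ [(q, r)]) = pvFmt k l ++ pvLine q r := by
  simp only [pvFmt, List.foldl_append, List.foldl_cons, List.foldl_nil]
  rw [← pvLine_eq q r, String.append_assoc]

-- the invariant relation between A's dict of lists and B's dict of strings
def pvRel (d1 : PySem.Dict String (List (String × String))) (d2 : PySem.Dict String String) : Prop :=
  d2.items = d1.items.map (fun p => (p.1, pvFmt p.1 p.2))

theorem pvItems_insert_pos {ν : Type} (d : PySem.Dict String ν) (k : String) (v : ν)
    (hc : d.contains k = true) :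
    (d.insert k v).items = d.items.map (fun p => if (p.1 == k) = true then (k, v) else p) := by
  simp [PySem.Dict.insert, hc]

theorem pvItems_insert_neg {ν : Type} (d : PySem.Dict String ν) (k : String) (v : ν)
    (hc : d.contains k = false) :
    (d.insert k v).items = d.items ++ [(k, v)] := by
  simp [PySem.Dict.insert, hc]

theorem pvRel_contains (d1 : PySem.Dict String (List (String × String))) (d2 : PySem.Dict String String)
    (h : pvRel d1 d2) (k : String) : d2.contains k = d1.contains k := by
  unfold pvRel at h
  simp [PySem.Dict.contains, h, List.any_map, Function.comp_def]

theorem pvRel_get? (d1 : PySem.Dict String (List (String × String))) (d2 : PySem.Dict String String)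
    (h : pvRel d1 d2) (k : String) :
    d2.get? k = (d1.get? k).map (pvFmt k) := by
  unfold pvRel at h
  simp only [PySem.Dict.get?, h, List.find?_map]
  cases hf : List.find? (fun p => p.1 == k) d1.items with
  | none =>
      have : (List.find? ((fun p => p.1 == k) ∘ fun p => (p.1, pvFmt p.1 p.2)) d1.items) = none := by
        simpa [Function.comp] using hf
      simp [this, hf]
  | some p =>
      have hk : p.1 = k := by
        have := List.find?_some hf
        simpa using this
      have : (List.find? ((fun p => p.1 == k) ∘ fun p => (p.1, pvFmt p.1 p.2)) d1.items) = some p := by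
        simpa [Function.comp] using hf
      simp [this, hf, hk]

theorem pvRel_step (d1 : PySem.Dict String (List (String × String))) (d2 : PySem.Dict String String)
    (h : pvRel d1 d2) (k q r : String) :
    pvRel
      (let d := if d1.contains k then d1 else d1.insert k []
       d.insert k (d.getD k [] ++ [(q, r)]))
      (let d := if d2.contains k then d2
                else d2.insert k ("About " ++ PySem.Str.replace k "_" " " ++ ":")
       d.insert k (d.getD k "" ++ pvLine q r)) := by
  have hI : d2.items = List.map (fun p => (p.1, pvFmt p.1 p.2)) d1.items := h
  have hc2 := pvRel_contains d1 d2 h k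
  by_cases hc : d1.contains k = true
  · -- key already present: both sides update the existing entry in place
    rw [if_pos hc, if_pos (hc2.trans hc)]
    cases hget : d1.get? k with
    | none =>
        exfalso
        have hnone : List.find? (fun p => p.1 == k) d1.items = none := by
          simpa [PySem.Dict.get?] using hget
        have hfalse : d1.contains k = false := by
          rw [PySem.Dict.contains, List.any_eq_false]
          exact fun p hp => List.find?_eq_none.mp hnone p hp
        simp [hfalse] at hc
    | some v =>
        have hget2 : d2.get? k = some (pvFmt k v) := by
          rw [pvRel_get? d1 d2 h k, hget]; rfl
        have hD1 : d1.getD k [] = v := by simp [PySem.Dict.getD, hget]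
        have hD2 : d2.getD k "" = pvFmt k v := by simp [PySem.Dict.getD, hget2]
        show pvRel (d1.insert k (d1.getD k [] ++ [(q, r)])) (d2.insert k (d2.getD k "" ++ pvLine q r))
        rw [hD1, hD2]
        unfold pvRel
        rw [pvItems_insert_pos _ _ _ hc, pvItems_insert_pos _ _ _ (hc2.trans hc), hI,
          List.map_map, List.map_map]
        refine List.map_congr_left (fun p _ => ?_)
        by_cases hpk : (p.1 == k) = true
        · simp [Function.comp, hpk, pvFmt_append]
        · simp [Function.comp, hpk]
  · -- new key: both sides append a fresh entry
    have hc' : d1.contains k = false := by simpa using hc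
    have hc2' : d2.contains k = false := by rw [hc2]; exact hc'
    have habs1 : ∀ p ∈ d1.items, (p.1 == k) = false := by
      intro p hp
      cases hb : (p.1 == k) with
      | false => rfl
      | true =>
        have : d1.contains k = true := by
          rw [PySem.Dict.contains, List.any_eq_true]; exact ⟨p, hp, hb⟩
        exact absurd this (by simp [hc'])
    have hfind1 : List.find? (fun p => p.1 == k) d1.items = none :=
      List.find?_eq_none.mpr (fun p hp => by simp [habs1 p hp])
    have hfind2 : List.find? (fun p => p.1 == k) d2.items = none := by
      rw [hI, List.find?_map,
        List.find?_eq_none.mpr (fun p hp => by simp [Function.comp, habs1 p hp])]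
      rfl
    rw [if_neg (by simp [hc']), if_neg (by simp [hc2'])]
    have hit1 : (d1.insert k []).items = d1.items ++ [(k, [])] :=
      pvItems_insert_neg _ _ _ hc'

    have hit2 : (d2.insert k ("About " ++ PySem.Str.replace k "_" " " ++ ":")).items
        = d2.items ++ [(k, "About " ++ PySem.Str.replace k "_" " " ++ ":")] :=
      pvItems_insert_neg _ _ _ hc2'

    have hD1 : (d1.insert k []).getD k [] = [] := by
      simp [PySem.Dict.getD, PySem.Dict.get?, hit1, List.find?_append, hfind1]
    have hD2 : (d2.insert k ("About " ++ PySem.Str.replace k "_" " " ++ ":")).getD k ""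
        = "About " ++ PySem.Str.replace k "_" " " ++ ":" := by
      simp [PySem.Dict.getD, PySem.Dict.get?, hit2, List.find?_append, hfind2]
    have hco1 : (d1.insert k []).contains k = true := by
      simp [PySem.Dict.contains, hit1]
    have hco2 : (d2.insert k ("About " ++ PySem.Str.replace k "_" " " ++ ":")).contains k = true := by
      simp [PySem.Dict.contains, hit2]
    show pvRel
      ((d1.insert k []).insert k ((d1.insert k []).getD k [] ++ [(q, r)]))
      ((d2.insert k ("About " ++ PySem.Str.replace k "_" " " ++ ":")).insert k
        ((d2.insert k ("About " ++ PySem.Str.replace k "_" " " ++ ":")).getD k "" ++ pvLine q r))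
    rw [hD1, hD2]
    unfold pvRel
    rw [pvItems_insert_pos _ _ _ hco1, pvItems_insert_pos _ _ _ hco2, hit1, hit2]
    simp only [List.map_append, List.map_map]
    have hmap1 : List.map ((fun p => (p.1, pvFmt p.1 p.2)) ∘
        fun p => if (p.1 == k) = true then (k, [] ++ [(q, r)]) else p) d1.items
        = List.map (fun p => (p.1, pvFmt p.1 p.2)) d1.items :=
      List.map_congr_left (fun p hp => by simp [Function.comp, habs1 p hp])
    have hmap2 : List.map (fun p => if (p.1 == k) = true then
        (k, ("About " ++ PySem.Str.replace k "_" " " ++ ":") ++ pvLine q r) else p) d2.items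
        = d2.items := by
      rw [hI, List.map_map]
      exact List.map_congr_left (fun p hp => by simp [Function.comp, habs1 p hp])
    have hone : pvFmt k ([] ++ [(q, r)]) = ("About " ++ PySem.Str.replace k "_" " " ++ ":") ++ pvLine q r := by
      rw [pvFmt_append]; rfl
    simp [hI]
    refine ⟨fun a b hab => ?_, by simpa using hone.symm⟩
    have hne : ¬ a = k := by simpa using habs1 (a, b) hab
    simp [hne]

theorem pvRel_fold (history : List (List (String × String)))
    (d1 : PySem.Dict String (List (String × String))) (d2 : PySem.Dict String String)
    (h : pvRel d1 d2) :
    pvRel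
      (history.foldl (fun d item =>
        let metric_id := (PySem.Dict.mk item).getD "metric_id" "general"
        let d := if d.contains metric_id then d else d.insert metric_id []
        d.insert metric_id (d.getD metric_id [] ++
          [((PySem.Dict.mk item).getD "text" "", (PySem.Dict.mk item).getD "response_text" "")])) d1)
      (history.foldl (fun d item =>
        let metric_id := (PySem.Dict.mk item).getD "metric_id" "general"
        let d := if d.contains metric_id then d
                 else d.insert metric_id ("About " ++ PySem.Str.replace metric_id "_" " " ++ ":")
        d.insert metric_id (d.getD metric_id "" ++
          ("\n- When asked '" ++ (PySem.Dict.mk item).getD "text" "" ++ "', user responded: '" ++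
            PySem.Str.slice ((PySem.Dict.mk item).getD "response_text" "") none (some 100) ++ "...'"))) d2) := by
  induction history generalizing d1 d2 with
  | nil => exact h
  | cons item rest ih =>
      simp only [List.foldl_cons]
      exact ih _ _ (pvRel_step d1 d2 h _ _ _)

theorem pvParts_eq (l : List (String × List (String × String))) (acc : List String) :
    l.foldl (fun parts kv =>
      let metric_summary := "About " ++ PySem.Str.replace kv.1 "_" " " ++ ":"
      let metric_summary := kv.2.foldl (fun ms convo =>
        ms ++ ("\n- " ++ ("When asked '" ++ convo.1 ++ "', user responded: '" ++
          PySem.Str.slice convo.2 none (some 100) ++ "...'"))) metric_summary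
      parts ++ [metric_summary]) acc = acc ++ l.map (fun p => pvFmt p.1 p.2) := by
  induction l generalizing acc with
  | nil => simp
  | cons kv rest ih =>
      simp only [List.foldl_cons, List.map_cons]
      rw [ih]
      simp [pvFmt]

-- ===== VERDICT (by name: the statement is the Claim_ definition above) =====
theorem summarize_conversation_spec : Claim_equal_summarize_conversation := by
  unfold Claim_equal_summarize_conversation
  intro ss _
  unfold Spec_summarize_conversation summarize_conversation summarize_conversation_alt
  by_cases hh : (PySem.Dict.mk ss).getD "question_history" ([] : List (List (String × String))) = []
  · simp [hh]
  · simp only [if_neg hh]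
    have hrel := pvRel_fold ((PySem.Dict.mk ss).getD "question_history" []) PySem.Dict.empty PySem.Dict.empty rfl
    unfold pvRel at hrel
    rw [pvParts_eq]
    simp [PySem.Dict.values, hrel, List.map_map, Function.comp_def]
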